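-- pv_equiv track=rewrite | github.com/wyk18703232953/myResearch | codeComplex/data/filteredData/python/logn/python_logn_0242.py | solve_single
-- ===== SOURCE A (Python) =====
-- def sod(n: int) -> int:
--     s = 0
--     while n:
--         s += (n % 10)
--         n //= 10
--     return s
--
-- def solve_single(n: int, s: int) -> int:
--     def fun(mid: int) -> bool:
--         return mid - sod(mid) >= s
--
--     l = 0
--     r = n
--     ans = -1
--     while l <= r:
--         m = l + (r - l) // 2
--         if fun(m):
--             ans = m
--             r = m - 1
--         else:
--             l = m + 1
--     if ans == -1:
--         ans = n + 1
--     return n - ans + 1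
-- ===== SOURCE B (Python) =====
-- def sod(n: int) -> int:
--     s = 0
--     while n:
--         s += (n % 10)
--         n //= 10
--     return s
--
-- def solve_single(n: int, s: int) -> int:
--     # The least x >= 0 with x - sod(x) >= s lies in [max(0, s), max(0, s) + 100):
--     # any satisfier x has x >= s (since sod(x) >= 0) and x >= 0, and x = max(0,s)+99
--     # already satisfies because sod(x) <= 90 for every x below 10**10 (|s| <= 2**31).
--     lo = max(0, s)
--     a = next(x for x in range(lo, lo + 100) if x - sod(x) >= s)
--     return max(0, n - a + 1)
-- ===== Notes on version B (the rewrite author's own statement) =====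
-- stated objective: alternative
-- what changed: Replaces the binary search over [0,n] with a direct computation of the least x satisfying x-sod(x)>=s: a bounded scan of the 100-wide window [max(0,s), max(0,s)+100) (enough because sod(x)<=90 for x below 10^10), then the closed form max(0, n-a+1).
import Mathlib
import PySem

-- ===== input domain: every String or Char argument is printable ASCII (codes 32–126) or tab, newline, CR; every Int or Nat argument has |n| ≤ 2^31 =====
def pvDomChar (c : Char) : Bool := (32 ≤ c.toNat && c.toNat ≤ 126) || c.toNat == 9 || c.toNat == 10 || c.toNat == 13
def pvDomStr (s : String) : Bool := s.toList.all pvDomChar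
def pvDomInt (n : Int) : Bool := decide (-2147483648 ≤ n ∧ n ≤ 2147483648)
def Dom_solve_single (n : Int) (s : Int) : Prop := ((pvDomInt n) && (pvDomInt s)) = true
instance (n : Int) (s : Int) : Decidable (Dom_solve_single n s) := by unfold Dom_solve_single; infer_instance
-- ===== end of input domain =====

-- B replaces A's binary search by a direct bounded scan for the least satisfier plus a closed-form count (alternative decomposition, no speed claim).

-- ===== PORT A =====
-- A's `sod` while-loop as the structural recursion it performs; exact for n ≥ 0
-- (the only arguments A ever passes: every probed midpoint m satisfies 0 ≤ l ≤ m).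
def sodNat (n : Nat) : Nat :=
  if h : n = 0 then 0 else n % 10 + sodNat (n / 10)
decreasing_by exact Nat.div_lt_self (Nat.pos_of_ne_zero h) (by norm_num)

def sod (n : Int) : Int := (sodNat n.toNat : Int)

-- A's while-loop: state (l, r, ans)
def ssLoop (s l r ans : Int) : Int :=
  if _h : l ≤ r then
    let m := l + PySem.Int.floordiv (r - l) 2
    if s ≤ m - sod m then ssLoop s l (m - 1) m
    else ssLoop s (m + 1) r ans
  else ans
termination_by (r + 1 - l).toNat
decreasing_by
  · have h2 := PySem.Int.floordiv_eq_ediv_of_pos (a := r - l) (by norm_num : (0:Int) < 2)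
    omega
  · have h2 := PySem.Int.floordiv_eq_ediv_of_pos (a := r - l) (by norm_num : (0:Int) < 2)
    omega

def solve_single (n : Int) (s : Int) : Int :=
  let ans := ssLoop s 0 n (-1)
  let ans2 := if ans = -1 then n + 1 else ans
  n - ans2 + 1

-- ===== PORT B =====
def solve_single_alt (n : Int) (s : Int) : Int :=
  let lo := max 0 s
  -- Python's next(...) raises StopIteration exactly when find? is none; that never
  -- happens for |s| ≤ 2^31 (inside Dom), so the none-arm value is never claimed.
  match (PySem.List.pyRange lo (lo + 100) 1).find? (fun x => decide (s ≤ x - sod x)) with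
  | some a => max 0 (n - a + 1)
  | none => 0

-- ===== PRECONDITION & SPEC =====
def Spec_solve_single (n : Int) (s : Int) (out : Int) : Prop := out = solve_single_alt n s
instance (n : Int) (s : Int) (out : Int) : Decidable (Spec_solve_single n s out) := by unfold Spec_solve_single; infer_instance

-- ===== CLAIM (what is proved, stated in full; the proofs are below) =====
def Claim_equal_solve_single : Prop := ∀ (n : Int) (s : Int), Dom_solve_single n s → Spec_solve_single n s (solve_single n s)

-- ===== LEMMAS AND PROOFS =====

lemma sodNat_succ_le (n : Nat) : sodNat (n + 1) ≤ sodNat n + 1 := by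
  induction n using Nat.strong_induction_on with
  | _ n ih =>
    by_cases h0 : n = 0
    · subst h0; simp [sodNat]
    by_cases h9 : n % 10 = 9
    · have hdiv : (n + 1) / 10 = n / 10 + 1 := by omega
      have hmod : (n + 1) % 10 = 0 := by omega
      have hlt : n / 10 < n := Nat.div_lt_self (Nat.pos_of_ne_zero h0) (by norm_num)
      have h1 : sodNat (n + 1) = 0 + sodNat (n / 10 + 1) := by
        rw [sodNat]; simp [hmod, hdiv]
      have h2 : sodNat n = 9 + sodNat (n / 10) := by
        rw [sodNat]; simp [h0, h9]
      have := ih (n / 10) hlt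
      omega
    · have hdiv : (n + 1) / 10 = n / 10 := by omega
      have hmod : (n + 1) % 10 = n % 10 + 1 := by omega
      have h1 : sodNat (n + 1) = n % 10 + 1 + sodNat (n / 10) := by
        rw [sodNat]; simp [hmod, hdiv]
      have h2 : sodNat n = n % 10 + sodNat (n / 10) := by
        rw [sodNat]; simp [h0]
      omega

lemma sub_sodNat_mono (a b : Nat) (h : a ≤ b) :
    (a : Int) - sodNat a ≤ (b : Int) - sodNat b := by
  induction b, h using Nat.le_induction with
  | base => exact le_refl _
  | succ b _ ih =>
    have := sodNat_succ_le b
    push_cast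
    push_cast at ih
    omega

lemma P_mono {s x y : Int} (hx : 0 ≤ x) (hxy : x ≤ y) (hP : s ≤ x - sod x) :
    s ≤ y - sod y := by
  have h := sub_sodNat_mono x.toNat y.toNat (by omega)
  simp only [sod] at *
  omega

lemma sodNat_le_of_lt_pow (d : Nat) : ∀ k : Nat, k < 10 ^ d → sodNat k ≤ 9 * d := by
  induction d with
  | zero => intro k hk; interval_cases k; simp [sodNat]
  | succ d ih =>
    intro k hk
    by_cases h0 : k = 0
    · subst h0; simp [sodNat]
    · have hdiv : k / 10 < 10 ^ d := by
        rw [Nat.div_lt_iff_lt_mul (by norm_num)]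
        calc k < 10 ^ (d + 1) := hk
        _ = 10 ^ d * 10 := by ring
      have h1 : sodNat k = k % 10 + sodNat (k / 10) := by rw [sodNat]; simp [h0]
      have := ih (k / 10) hdiv
      have : k % 10 ≤ 9 := by omega
      omega

lemma sod_nonneg (x : Int) : 0 ≤ sod x := by
  simp only [sod]; exact Int.natCast_nonneg _

-- A-loop correctness: the loop returns -1 when nothing in [0,n] satisfies, else the
-- least satisfier of [0,n].
lemma ssLoop_correct (s n : Int) : ∀ (N : Nat) (l r ans : Int), (r + 1 - l).toNat = N →
    0 ≤ l → r ≤ n →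
    (∀ x, 0 ≤ x → x < l → ¬ (s ≤ x - sod x)) →
    ((ans = -1 ∧ r = n) ∨ ((s ≤ ans - sod ans) ∧ ans = r + 1 ∧ l ≤ ans ∧ ans ≤ n)) →
    (ssLoop s l r ans = -1 ∧ ∀ x, 0 ≤ x → x ≤ n → ¬ (s ≤ x - sod x)) ∨
    ((s ≤ ssLoop s l r ans - sod (ssLoop s l r ans)) ∧ 0 ≤ ssLoop s l r ans ∧
      ssLoop s l r ans ≤ n ∧
      ∀ x, 0 ≤ x → x < ssLoop s l r ans → ¬ (s ≤ x - sod x)) := by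
  intro N
  induction N using Nat.strong_induction_on with
  | _ N ih =>
    intro l r ans hN hl hr hbelow hinv
    rw [ssLoop]
    by_cases hlr : l ≤ r
    · rw [dif_pos hlr]
      have hflo := PySem.Int.floordiv_eq_ediv_of_pos (a := r - l) (by norm_num : (0:Int) < 2)
      set m := l + PySem.Int.floordiv (r - l) 2 with hm
      have hmb : l ≤ m ∧ m ≤ r := by rw [hm, hflo]; omega
      by_cases hpm : s ≤ m - sod m
      · rw [if_pos hpm]
        exact ih (m - 1 + 1 - l).toNat (by omega) l (m - 1) m rfl hl (by omega)
          hbelow (Or.inr ⟨hpm, by ring, hmb.1, by omega⟩)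
      · rw [if_neg hpm]
        refine ih (r + 1 - (m + 1)).toNat (by omega) (m + 1) r ans rfl (by omega) hr
          ?_ ?_
        · intro x hx0 hxm
          by_cases hxl : x < l
          · exact hbelow x hx0 hxl
          · intro hPx
            exact hpm (P_mono hx0 (by omega) hPx)
        · rcases hinv with h | ⟨hpa, hra, hla, hna⟩
          · exact Or.inl h
          · exact Or.inr ⟨hpa, hra, by omega, hna⟩
    · rw [dif_neg hlr]
      rcases hinv with ⟨hae, hrn⟩ | ⟨hpa, hra, hla, hna⟩
      · refine Or.inl ⟨hae, ?_⟩
        intro x hx0 hxn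
        exact hbelow x hx0 (by omega)
      · refine Or.inr ⟨hpa, by omega, hna, ?_⟩
        intro x hx0 hxa
        exact hbelow x hx0 (by omega)

-- find? over a unit-step range returns the FIRST satisfier, given any witness in range.
lemma find_first (p : Int → Bool) : ∀ (N : Nat) (a b : Int), (b - a).toNat = N →
    ∀ w, a ≤ w → w < b → p w = true →
    ∃ c, (PySem.List.pyRange a b 1).find? p = some c ∧ a ≤ c ∧ c ≤ w ∧ p c = true ∧
      ∀ x, a ≤ x → x < c → p x = false := by
  intro N
  induction N using Nat.strong_induction_on with
  | _ N ih =>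
    intro a b hN w haw hwb hpw
    have hab : a < b := by omega
    rw [PySem.List.pyRange_one_cons hab, List.find?_cons]
    by_cases hpa : p a = true
    · rw [hpa]
      exact ⟨a, rfl, le_refl a, haw, hpa, fun x hx1 hx2 => absurd (by omega : a ≤ x ∧ x < a) (by omega)⟩
    · rw [Bool.not_eq_true] at hpa
      rw [hpa]
      have hwa : a + 1 ≤ w := by
        rcases eq_or_lt_of_le haw with h | h
        · subst h; rw [hpw] at hpa; exact absurd hpa (by simp)
        · omega
      obtain ⟨c, hfind, hac, hcw, hpc, hmin⟩ :=
        ih (b - (a + 1)).toNat (by omega) (a + 1) b rfl w hwa hwb hpw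
      refine ⟨c, hfind, by omega, hcw, hpc, ?_⟩
      intro x hx1 hx2
      by_cases hxa : x = a
      · subst hxa; exact hpa
      · exact hmin x (by omega) hx2

-- ===== VERDICT (by name: the statement is the Claim_ definition above) =====
theorem solve_single_spec : Claim_equal_solve_single := by
  intro n s hdom
  have hs : -2147483648 ≤ s ∧ s ≤ 2147483648 := by
    simp only [Dom_solve_single, pvDomInt, Bool.and_eq_true, decide_eq_true_eq] at hdom
    exact hdom.2
  show solve_single n s = solve_single_alt n s
  set lo : Int := max 0 s with hlo
  -- the window witness
  have hw : (fun x => decide (s ≤ x - sod x)) (lo + 99) = true := by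
    have hbnd : sodNat (lo + 99).toNat ≤ 9 * 10 := by
      apply sodNat_le_of_lt_pow 10
      omega
    simp only [decide_eq_true_eq, sod]
    omega
  obtain ⟨c, hfind, hlc, hcw, hpc, hmin⟩ :=
    find_first (fun x => decide (s ≤ x - sod x)) 100 lo (lo + 100) (by omega)
      (lo + 99) (by omega) (by omega) hw
  have hpc' : s ≤ c - sod c := by simpa using hpc
  have hout := ssLoop_correct s n (n + 1 - 0).toNat 0 n (-1) rfl (le_refl 0)
    (le_refl n) (by intro x hx0 hxl; omega) (Or.inl ⟨rfl, rfl⟩)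
  simp only [solve_single, solve_single_alt, ← hlo]
  rw [hfind]
  rcases hout with ⟨hm1, hnone⟩ | ⟨hP, h0, hn, hminA⟩
  · -- no satisfier in [0,n]: A returns 0; c must exceed n
    rw [hm1, if_pos rfl]
    show n - (n + 1) + 1 = max 0 (n - c + 1)
    have hcn : n < c := by
      by_contra h
      exact hnone c (by omega) (by omega) hpc'
    omega
  · -- least satisfier out = c
    set out := ssLoop s 0 n (-1) with hoa
    have hne : ¬ (out = -1) := by omega
    rw [if_neg hne]
    show n - out + 1 = max 0 (n - c + 1)
    have hsc : s ≤ out := by have := sod_nonneg out; omega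
    have hloout : lo ≤ out := by omega
    have hcout : c = out := by
      rcases lt_trichotomy c out with h | h | h
      · exact absurd hpc' (hminA c (by omega) h)
      · exact h
      · exact absurd hP (of_decide_eq_false (hmin out hloout h))
    omega
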